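-- pv_equiv track=rewrite | github.com/EPFL-TOP/singlecells_notebooks | utils.py | select_data
-- ===== SOURCE A (Python) =====
-- import copy
--
-- def select_data(analysis_data, selected_positions):
--     selected_data = {}
--     for exp in analysis_data:
--         for selexp in selected_positions:
--             if selexp in exp:
--                 selected_data[exp]={}
--                 for well in analysis_data[exp]:
--                     for selwell in selected_positions[selexp]:
--                         if selwell in well:
--                             selected_data[exp][well]={}
--                             for pos in analysis_data[exp][well]:
--                                 for selpos in selected_positions[selexp][selwell]:
--                                     if selpos in pos:
--                                         selected_data[exp][well][pos]=analysis_data[exp][well][pos]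
--     return remove_empty_stuff(selected_data)
--
-- def remove_empty_stuff(analysis_data):
--     to_ret = copy.deepcopy(analysis_data)
--     for exp in analysis_data:
--         for well in analysis_data[exp]:
--             for pos in analysis_data[exp][well]:
--                 if len(analysis_data[exp][well][pos]['cells'])==0:
--                     del to_ret[exp][well][pos]
--
--     to_ret2 = copy.deepcopy(to_ret)
--     for exp in to_ret:
--         for well in to_ret[exp]:
--             if len(to_ret[exp][well])==0: del to_ret2[exp][well]
--
--     to_ret3 = copy.deepcopy(to_ret2)
--     for exp in to_ret2:
--         if len(to_ret2[exp])==0: del to_ret3[exp]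
--
--     return to_ret3
-- ===== SOURCE B (Python) =====
-- import copy
--
-- def _last_match(selectors, key):
--     found = None
--     for s, v in selectors.items():
--         if s in key:
--             found = v
--     return found
--
-- def select_data(analysis_data, selected_positions):
--     # one pass: resolve the last matching selector per level, prune inline
--     result = {}
--     for exp, wells in analysis_data.items():
--         selwells = _last_match(selected_positions, exp)
--         if selwells is None:
--             continue
--         exp_out = {}
--         for well, poss in wells.items():
--             selposs = _last_match(selwells, well)
--             if selposs is None:
--                 continue
--             well_out = {pos: copy.deepcopy(pv) for pos, pv in poss.items()
--                         if any(s in pos for s in selposs) and len(pv['cells']) != 0}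
--             if well_out:
--                 exp_out[well] = well_out
--         if exp_out:
--             result[exp] = exp_out
--     return result
-- ===== Notes on version B (the rewrite author's own statement) =====
-- stated objective: simpler
-- what changed: Replaces the build-a-nested-dict-with-resets-then-three-deepcopy-and-delete-pruning-passes design by a single nested pass that resolves the last matching selector per level with a helper and only ever appends non-empty, already-pruned branches.
-- outside the precondition, e.g. on select_data({'e': {'w': {'p': {}}}}, {'': {'w': ['p']}, 'e': {'z': ['p']}}): A returns {}, B returns {}
import Mathlib
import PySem

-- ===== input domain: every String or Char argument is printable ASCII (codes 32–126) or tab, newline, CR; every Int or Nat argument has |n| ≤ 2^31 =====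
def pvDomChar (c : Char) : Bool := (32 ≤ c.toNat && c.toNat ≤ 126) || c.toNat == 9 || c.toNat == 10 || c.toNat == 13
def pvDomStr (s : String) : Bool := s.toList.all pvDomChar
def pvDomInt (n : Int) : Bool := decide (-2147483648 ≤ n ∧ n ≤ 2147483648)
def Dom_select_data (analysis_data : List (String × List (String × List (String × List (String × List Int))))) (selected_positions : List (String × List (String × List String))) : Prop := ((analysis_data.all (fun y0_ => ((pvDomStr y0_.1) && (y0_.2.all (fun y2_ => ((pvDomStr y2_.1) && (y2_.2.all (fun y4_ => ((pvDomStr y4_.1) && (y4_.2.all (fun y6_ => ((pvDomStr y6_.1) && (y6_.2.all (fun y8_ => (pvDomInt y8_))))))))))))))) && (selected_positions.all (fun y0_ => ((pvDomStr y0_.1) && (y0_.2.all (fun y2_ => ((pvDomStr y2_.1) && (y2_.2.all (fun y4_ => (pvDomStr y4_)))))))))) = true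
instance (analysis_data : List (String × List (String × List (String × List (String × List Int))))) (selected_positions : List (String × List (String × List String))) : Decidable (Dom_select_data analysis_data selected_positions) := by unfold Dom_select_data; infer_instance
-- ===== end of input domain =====

-- Header: B replaces A's build-with-resets-then-three-pruning-passes scheme by a single
-- nested pass (last matching selector resolved per level, empty branches never attached);
-- A mutates nothing observable, equivalence is about the returned value.

abbrev Pv := List (String × List Int)
abbrev PD := PySem.Dict String Pv
abbrev WD := PySem.Dict String PD
abbrev ED := PySem.Dict String WD

-- ===== PORT A =====
-- A iterates `for exp in analysis_data` and then looks `analysis_data[exp]` up again; since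
-- Python dict keys are unique the looked-up value IS the iterated entry's value, so the port
-- uses the iterated pair directly (exact; duplicate-key association lists are outside Pre_).

def aPosA (exp well pos : String) (pv : Pv) (sl : List String) (sd : ED) : ED :=
  sl.foldl (fun sd selpos =>
    if PySem.Str.isIn selpos pos then
      sd.modify exp PySem.Dict.empty (fun w => w.modify well PySem.Dict.empty (fun p => p.insert pos pv))
    else sd) sd

def aPossA (exp well : String) (poss : List (String × Pv)) (sl : List String) (sd : ED) : ED :=
  poss.foldl (fun sd q => aPosA exp well q.1 q.2 sl sd) sd

def aWellA (exp well : String) (poss : List (String × Pv)) (sw : List (String × List String)) (sd : ED) : ED :=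
  sw.foldl (fun sd r =>
    if PySem.Str.isIn r.1 well then
      aPossA exp well poss r.2 (sd.modify exp PySem.Dict.empty (fun w => w.insert well PySem.Dict.empty))
    else sd) sd

def aWellsA (exp : String) (wells : List (String × List (String × Pv))) (sw : List (String × List String)) (sd : ED) : ED :=
  wells.foldl (fun sd q => aWellA exp q.1 q.2 sw sd) sd

def aExpA (exp : String) (wells : List (String × List (String × Pv))) (sp : List (String × List (String × List String))) (sd : ED) : ED :=
  sp.foldl (fun sd r =>
    if PySem.Str.isIn r.1 exp then aWellsA exp wells r.2 (sd.insert exp PySem.Dict.empty) else sd) sd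

-- `pv['cells']` raises KeyError when absent; ported with getD (the default is never reached
-- inside Pre_, which guarantees 'cells' on every selectable position dict).
def remove_empty_stuff (d : ED) : ED :=
  let t1 := d.items.foldl (fun t q =>
    q.2.items.foldl (fun t r =>
      r.2.items.foldl (fun t s =>
        if ((PySem.Dict.mk s.2).getD "cells" []).length == 0 then
          t.modify q.1 PySem.Dict.empty (fun w => w.modify r.1 PySem.Dict.empty (fun p => p.erase s.1))
        else t) t) t) d
  let t2 := t1.items.foldl (fun t q =>
    q.2.items.foldl (fun t r =>
      if r.2.size == 0 then t.modify q.1 PySem.Dict.empty (fun w => w.erase r.1) else t) t) t1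
  let t3 := t2.items.foldl (fun t q => if q.2.size == 0 then t.erase q.1 else t) t2
  t3

def select_data (analysis_data : List (String × List (String × List (String × List (String × List Int))))) (selected_positions : List (String × List (String × List String))) : List (String × List (String × List (String × List (String × List Int)))) :=
  (remove_empty_stuff
      (analysis_data.foldl (fun sd q => aExpA q.1 q.2 selected_positions sd) PySem.Dict.empty)).items.map
    (fun q => (q.1, q.2.items.map (fun r => (r.1, r.2.items))))

-- ===== PORT B =====

def lastMatchB {α : Type} (selectors : List (String × α)) (key : String) : Option α :=
  selectors.foldl (fun found r => if PySem.Str.isIn r.1 key then some r.2 else found) none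

def select_data_alt (analysis_data : List (String × List (String × List (String × List (String × List Int))))) (selected_positions : List (String × List (String × List String))) : List (String × List (String × List (String × List (String × List Int)))) :=
  analysis_data.foldl (fun result q =>
    match lastMatchB selected_positions q.1 with
    | none => result
    | some selwells =>
      let expOut := q.2.foldl (fun eo r =>
        match lastMatchB selwells r.1 with
        | none => eo
        | some selposs =>
          let wellOut := r.2.filter (fun s =>
            selposs.any (fun t => PySem.Str.isIn t s.1) &&
              !(((PySem.Dict.mk s.2).getD "cells" []).length == 0))
          if wellOut.isEmpty then eo else eo ++ [(r.1, wellOut)]) []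
      if expOut.isEmpty then result else result ++ [(q.1, expOut)]) []

-- ===== PRECONDITION & SPEC =====
-- Pre_ excludes (a) association lists with duplicate keys inside analysis_data (a Python dict
-- argument can never have them, so nothing A accepts is lost) and (b) inputs on which a position
-- dict without a 'cells' key is reachable through a chain of matching selectors: on the selected
-- chain A raises KeyError, and the clause conservatively also covers non-final matching chains
-- (on those excluded-but-returning inputs A and B both return the empty dict).
def Pre_select_data (analysis_data : List (String × List (String × List (String × List (String × List Int))))) (selected_positions : List (String × List (String × List String))) : Prop :=
  ((analysis_data.map Prod.fst).Nodup ∧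
    ∀ q ∈ analysis_data, (q.2.map Prod.fst).Nodup ∧ ∀ r ∈ q.2, (r.2.map Prod.fst).Nodup) ∧
  (∀ q ∈ analysis_data, ∀ a ∈ selected_positions, PySem.Str.isIn a.1 q.1 = true →
    ∀ r ∈ q.2, ∀ b ∈ a.2, PySem.Str.isIn b.1 r.1 = true →
      ∀ s ∈ r.2, (∃ t ∈ b.2, PySem.Str.isIn t s.1 = true) → "cells" ∈ s.2.map Prod.fst)

instance (analysis_data : List (String × List (String × List (String × List (String × List Int))))) (selected_positions : List (String × List (String × List String))) : Decidable (Pre_select_data analysis_data selected_positions) := by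
  unfold Pre_select_data; infer_instance

def pvWitness_select_data : (List (String × List (String × List (String × List (String × List Int))))) × (List (String × List (String × List String))) :=
  ([("e", [("w", [("p", [("cells", [1])])])])], [("e", [("w", ["p"])])])

def Spec_select_data (analysis_data : List (String × List (String × List (String × List (String × List Int))))) (selected_positions : List (String × List (String × List String))) (out : List (String × List (String × List (String × List (String × List Int))))) : Prop := out = select_data_alt analysis_data selected_positions
instance (analysis_data : List (String × List (String × List (String × List (String × List Int))))) (selected_positions : List (String × List (String × List String))) (out : List (String × List (String × List (String × List (String × List Int))))) : Decidable (Spec_select_data analysis_data selected_positions out) := by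
  unfold Spec_select_data
  have h1 : DecidableEq (List (String × List Int)) := by infer_instance
  have h2 : DecidableEq (List (String × List (String × List Int))) := by infer_instance
  have h3 : DecidableEq (List (String × List (String × List (String × List Int)))) := by infer_instance
  infer_instance

-- ===== CLAIM (what is proved, stated in full; the proofs are below) =====
def Claim_equal_select_data : Prop := ∀ (analysis_data : List (String × List (String × List (String × List (String × List Int))))) (selected_positions : List (String × List (String × List String))), Dom_select_data analysis_data selected_positions → Pre_select_data analysis_data selected_positions → Spec_select_data analysis_data selected_positions (select_data analysis_data selected_positions)

-- ===== LEMMAS AND PROOFS =====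

-- spec-side descriptions of A's intermediate dicts
def matchA (sl : List String) (pos : String) : Bool := sl.any (fun t => PySem.Str.isIn t pos)

def PDf (sl : List String) (poss : List (String × Pv)) : PD :=
  PySem.Dict.mk (poss.filter (fun s => matchA sl s.1))

def WDf (sw : List (String × List String)) (wells : List (String × List (String × Pv))) : WD :=
  PySem.Dict.mk (wells.filterMap (fun r => (lastMatchB sw r.1).map (fun sl => (r.1, PDf sl r.2))))

def SJ (ad : List (String × List (String × List (String × Pv)))) (sp : List (String × List (String × List String))) : List (String × WD) :=
  ad.filterMap (fun q => (lastMatchB sp q.1).map (fun sw => (q.1, WDf sw q.2)))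

-- generic dict-algebra lemmas ----------------------------------------------------------------

theorem pvM1 {ν : Type} (d : PySem.Dict String ν) (k : String) (w d0 : ν) (f : ν → ν) :
    (d.insert k w).modify k d0 f = d.insert k (f w) := by
  simp [PySem.Dict.modify, PySem.Dict.getD_insert_self, PySem.Dict.insert_insert_self]


theorem pvMapId {ν : Type} (L : List (String × ν)) (k : String) (x : String × ν)
    (hk : k ∉ L.map Prod.fst) :
    L.map (fun p => if p.1 == k then x else p) = L := by
  induction L with
  | nil => rfl
  | cons p t ih =>
    simp only [List.map_cons, List.mem_cons] at hk ⊢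
    push Not at hk
    rw [if_neg (by simpa using fun e : p.1 = k => hk.1 e.symm), ih hk.2]

theorem pvFilterId {ν : Type} (L : List (String × ν)) (k : String)
    (hk : k ∉ L.map Prod.fst) :
    L.filter (fun p => !(p.1 == k)) = L := by
  induction L with
  | nil => rfl
  | cons p t ih =>
    simp only [List.map_cons, List.mem_cons] at hk ⊢
    push Not at hk
    rw [List.filter_cons_of_pos (by simpa using fun e : p.1 = k => hk.1 e.symm), ih hk.2]

theorem pvNotMemLeft {ν : Type} (M L : List (String × ν)) (q : String × ν)
    (h : ((M ++ q :: L).map Prod.fst).Nodup) : q.1 ∉ M.map Prod.fst := by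
  rw [List.map_append] at h
  have hd := List.disjoint_of_nodup_append h
  intro hm
  exact hd hm (by simp)

theorem pvNotMemRight {ν : Type} (M L : List (String × ν)) (q : String × ν)
    (h : ((M ++ q :: L).map Prod.fst).Nodup) : q.1 ∉ L.map Prod.fst := by
  rw [List.map_append] at h
  have := h.of_append_right
  simp only [List.map_cons, List.nodup_cons] at this
  exact this.1

theorem pvOverwrite {ν : Type} (M L : List (String × ν)) (q : String × ν) (v : ν)
    (h : ((M ++ q :: L).map Prod.fst).Nodup) :
    (M ++ q :: L).map (fun p => if p.1 == q.1 then (q.1, v) else p) = M ++ (q.1, v) :: L := by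
  rw [List.map_append, List.map_cons, if_pos (by simp), pvMapId M q.1 _ (pvNotMemLeft M L q h),
    pvMapId L q.1 _ (pvNotMemRight M L q h)]

theorem pvInsertMid {ν : Type} (M L : List (String × ν)) (q : String × ν) (v : ν)
    (h : ((M ++ q :: L).map Prod.fst).Nodup) :
    (PySem.Dict.mk (M ++ q :: L)).insert q.1 v = PySem.Dict.mk (M ++ (q.1, v) :: L) := by
  have hc : (PySem.Dict.mk (M ++ q :: L)).contains q.1 = true := by
    simp [PySem.Dict.contains]
  simp only [PySem.Dict.insert, hc, if_pos]
  exact congrArg PySem.Dict.mk (pvOverwrite M L q v h)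

theorem pvEraseMid {ν : Type} (M L : List (String × ν)) (q : String × ν)
    (h : ((M ++ q :: L).map Prod.fst).Nodup) :
    (PySem.Dict.mk (M ++ q :: L)).erase q.1 = PySem.Dict.mk (M ++ L) := by
  simp only [PySem.Dict.erase]
  refine congrArg PySem.Dict.mk ?_
  rw [List.filter_append, List.filter_cons_of_neg (by simp), pvFilterId M q.1 (pvNotMemLeft M L q h),
    pvFilterId L q.1 (pvNotMemRight M L q h)]

theorem pvTransport {ν χ : Type} (k : String) (l : List χ)
    (stepO : PySem.Dict String ν → χ → PySem.Dict String ν) (stepI : ν → χ → ν)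
    (h : ∀ (d : PySem.Dict String ν) (w : ν) (x : χ), x ∈ l → stepO (d.insert k w) x = d.insert k (stepI w x)) :
    ∀ (d : PySem.Dict String ν) (w : ν), l.foldl stepO (d.insert k w) = d.insert k (l.foldl stepI w) := by
  induction l with
  | nil => intro d w; rfl
  | cons x t ih =>
    intro d w
    simp only [List.foldl_cons]
    rw [h d w x (List.mem_cons_self ..)]
    exact ih (fun d w y hy => h d w y (List.mem_cons_of_mem _ hy)) d (stepI w x)

theorem pvLastMatchInit {α : Type} (k : String) :
    ∀ (l : List (String × α)) (r : Option α),
      l.foldl (fun f p => if PySem.Str.isIn p.1 k then some p.2 else f) r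
        = (lastMatchB l k).elim r some := by
  intro l
  simp only [lastMatchB]
  induction l with
  | nil => intro r; rfl
  | cons p t ih =>
    intro r
    simp only [List.foldl_cons]
    rw [ih (if PySem.Str.isIn p.1 k = true then some p.2 else r),
      ih (if PySem.Str.isIn p.1 k = true then some p.2 else none)]
    cases t.foldl (fun f p => if PySem.Str.isIn p.1 k = true then some p.2 else f) none with
    | some v => rfl
    | none =>
      simp only [Option.elim_none]
      by_cases hp : PySem.Str.isIn p.1 k = true
      · rw [if_pos hp, if_pos hp]; rfl
      · rw [if_neg hp, if_neg hp]; rfl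

theorem pvResetLoop {ν π : Type} (key : String) (F : π → ν) :
    ∀ (sels : List (String × π)) (d : PySem.Dict String ν),
      sels.foldl (fun d p => if PySem.Str.isIn p.1 key then d.insert key (F p.2) else d) d
        = (lastMatchB sels key).elim d (fun pl => d.insert key (F pl)) := by
  intro sels
  induction sels with
  | nil => intro d; rfl
  | cons p t ih =>
    intro d
    have hcons : lastMatchB (p :: t) key
        = (lastMatchB t key).elim (if PySem.Str.isIn p.1 key then some p.2 else none) some := by
      simp only [lastMatchB, List.foldl_cons]
      rw [pvLastMatchInit key t (if PySem.Str.isIn p.1 key = true then some p.2 else none)]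
      rfl
    simp only [List.foldl_cons]
    by_cases hp : PySem.Str.isIn p.1 key = true
    · rw [if_pos hp, ih, hcons]
      cases lastMatchB t key with
      | none => simp only [Option.elim_none, if_pos hp, Option.elim_some]
      | some pl => exact PySem.Dict.insert_insert_self d key (F p.2) (F pl)
    · rw [if_neg hp, ih, hcons]
      cases lastMatchB t key with
      | none => simp only [Option.elim_none, if_neg hp]
      | some pl => rfl

theorem pvIdemFold {ν : Type} (g : ν → ν) (hg : ∀ w, g (g w) = g w) (c : String → Bool) :
    ∀ (sl : List String) (w : ν),
      sl.foldl (fun w s => if c s then g w else w) w = if sl.any c then g w else w := by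
  intro sl
  induction sl with
  | nil => intro w; simp
  | cons s t ih =>
    intro w
    simp only [List.foldl_cons, List.any_cons]
    by_cases hs : c s
    · rw [if_pos hs, ih]
      by_cases ht : t.any c <;> simp [hs, ht, hg]
    · rw [if_neg hs, ih]
      simp [hs]

theorem pvFreshFold {χ ν : Type} (sel : String → χ → Option ν) :
    ∀ (l : List (String × χ)) (d : PySem.Dict String ν), (l.map Prod.fst).Nodup →
      (∀ p ∈ l, d.contains p.1 = false) →
      l.foldl (fun d p => (sel p.1 p.2).elim d (fun v => d.insert p.1 v)) d
        = PySem.Dict.mk (d.items ++ l.filterMap (fun p => (sel p.1 p.2).map (fun v => (p.1, v)))) := by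
  intro l
  induction l with
  | nil => intro d _ _; simp
  | cons p t ih =>
    intro d hnd hfresh
    simp only [List.map_cons, List.nodup_cons] at hnd
    simp only [List.foldl_cons, List.filterMap_cons]
    cases hsel : sel p.1 p.2 with
    | none =>
      simp only [Option.map_none, Option.elim_none]
      exact ih d hnd.2 (fun x hx => hfresh x (List.mem_cons_of_mem _ hx))
    | some v =>
      have hfr : d.contains p.1 = false := hfresh p (List.mem_cons_self ..)
      have htail : ∀ x ∈ t, (d.insert p.1 v).contains x.1 = false := by
        intro x hx
        rw [PySem.Dict.contains_insert]
        have hne : ¬ x.1 = p.1 := fun e => hnd.1 (e ▸ List.mem_map_of_mem hx)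
        simp [hne, hfresh x (List.mem_cons_of_mem _ hx)]
      simp only [Option.map_some, Option.elim_some]
      rw [ih (d.insert p.1 v) hnd.2 htail, PySem.Dict.items_insert_of_not_contains (h := hfr)]
      simp

theorem pvEraseSelf {ν : Type} (c : String × ν → Bool) :
    ∀ (l M : List (String × ν)), ((M ++ l).map Prod.fst).Nodup →
      l.foldl (fun p q => if c q then p.erase q.1 else p) (PySem.Dict.mk (M ++ l))
        = PySem.Dict.mk (M ++ l.filter (fun q => !c q)) := by
  intro l
  induction l with
  | nil => intro M _; simp
  | cons q t ih =>
    intro M hnd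
    simp only [List.foldl_cons]
    by_cases hq : c q = true
    · rw [if_pos hq, pvEraseMid M t q hnd, List.filter_cons_of_neg (by simp [hq])]
      exact ih M ((List.Sublist.map Prod.fst ((List.sublist_cons_self q t).append_left M)).nodup hnd)
    · rw [if_neg hq, List.filter_cons_of_pos (by simp [hq]), List.append_cons M q t,
        List.append_cons M q (t.filter fun q => !c q)]
      exact ih (M ++ [q]) (by rwa [← List.append_cons])

theorem pvEditSelf {ν : Type} (editO : PySem.Dict String ν → (String × ν) → PySem.Dict String ν)
    (editI : (String × ν) → ν → ν)
    (h : ∀ (d : PySem.Dict String ν) (w : ν) (q : String × ν), editO (d.insert q.1 w) q = d.insert q.1 (editI q w)) :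
    ∀ (l M : List (String × ν)), ((M ++ l).map Prod.fst).Nodup →
      l.foldl editO (PySem.Dict.mk (M ++ l)) = PySem.Dict.mk (M ++ l.map (fun q => (q.1, editI q q.2))) := by
  intro l
  induction l with
  | nil => intro M _; simp
  | cons q t ih =>
    intro M hnd
    simp only [List.foldl_cons, List.map_cons]
    have hself : PySem.Dict.mk (M ++ q :: t) = (PySem.Dict.mk (M ++ q :: t)).insert q.1 q.2 := by
      rw [pvInsertMid M t q q.2 hnd]
    have h1 : editO (PySem.Dict.mk (M ++ q :: t)) q = PySem.Dict.mk (M ++ (q.1, editI q q.2) :: t) := by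
      conv_lhs => rw [hself]
      rw [h (PySem.Dict.mk (M ++ q :: t)) q.2 q, pvInsertMid M t q (editI q q.2) hnd]
    rw [h1, List.append_cons M (q.1, editI q q.2) t,
      List.append_cons M (q.1, editI q q.2) (t.map (fun q => (q.1, editI q q.2)))]
    refine ih (M ++ [(q.1, editI q q.2)]) ?_
    rw [← List.append_cons]
    simpa using hnd

theorem pvKeysFilterMap {χ ν : Type} (l : List (String × χ)) (f : String × χ → Option ν) :
    ((l.filterMap (fun q => (f q).map (fun v => (q.1, v)))).map Prod.fst).Sublist (l.map Prod.fst) := by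
  induction l with
  | nil => simp
  | cons q t ih =>
    simp only [List.filterMap_cons, List.map_cons]
    cases hf : f q with
    | none => simp only [Option.map_none]; exact ih.cons q.1
    | some v => simp only [Option.map_some]; exact ih.cons₂ q.1

-- characterization of A's build phase --------------------------------------------------------

theorem chPos (exp well pos : String) (pv : Pv) (sl : List String) (d : ED) (w : WD) :
    aPosA exp well pos pv sl (d.insert exp w)
      = d.insert exp (if matchA sl pos then w.modify well PySem.Dict.empty (fun p => p.insert pos pv) else w) := by
  unfold aPosA
  rw [pvTransport exp sl _
      (fun w s => if PySem.Str.isIn s pos then w.modify well PySem.Dict.empty (fun p => p.insert pos pv) else w)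
      (by
        intro d w x _
        dsimp only
        by_cases hx : PySem.Str.isIn x pos = true
        · rw [if_pos hx, if_pos hx, pvM1]
        · rw [if_neg hx, if_neg hx]) d w]
  congr 1
  exact pvIdemFold _
    (by
      intro w
      simp [PySem.Dict.modify, PySem.Dict.getD_insert_self, PySem.Dict.insert_insert_self])
    (fun s => PySem.Str.isIn s pos) sl w

theorem chPoss (exp well : String) (poss : List (String × Pv)) (sl : List String) (d : ED) (w : WD) :
    aPossA exp well poss sl (d.insert exp w)
      = d.insert exp (poss.foldl (fun w q => if matchA sl q.1 then w.modify well PySem.Dict.empty (fun p => p.insert q.1 q.2) else w) w) := by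
  unfold aPossA
  exact pvTransport exp poss (fun sd (q : String × Pv) => aPosA exp well q.1 q.2 sl sd)
    (fun w q => if matchA sl q.1 then w.modify well PySem.Dict.empty (fun p => p.insert q.1 q.2) else w)
    (by intro d w x _; dsimp only; exact chPos exp well x.1 x.2 sl d w) d w

theorem chPDf (sl : List String) (poss : List (String × Pv)) (hnd : (poss.map Prod.fst).Nodup) :
    poss.foldl (fun p q => if matchA sl q.1 then p.insert q.1 q.2 else p) PySem.Dict.empty = PDf sl poss := by
  rw [PySem.List.foldl_if_eq_foldl_filter]
  have hnd2 : ((poss.filter (fun q => matchA sl q.1)).map Prod.fst).Nodup :=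
    (List.Sublist.map Prod.fst List.filter_sublist).nodup hnd
  unfold PDf
  generalize hL : poss.filter (fun q => matchA sl q.1) = L at hnd2 ⊢
  apply PySem.Dict.ext
  rw [PySem.Dict.items_foldl_insert_fresh L Prod.fst Prod.snd PySem.Dict.empty
      (fun a _ => PySem.Dict.contains_empty a.1) hnd2]
  simp [PySem.Dict.empty]

theorem chWell (exp well : String) (poss : List (String × Pv)) (sw : List (String × List String))
    (d : ED) (w : WD) (hnd : (poss.map Prod.fst).Nodup) :
    aWellA exp well poss sw (d.insert exp w)
      = d.insert exp ((lastMatchB sw well).elim w (fun sl => w.insert well (PDf sl poss))) := by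
  unfold aWellA
  have step : ∀ (d : ED) (w : WD) (r : String × List String),
      (if PySem.Str.isIn r.1 well then
          aPossA exp well poss r.2 ((d.insert exp w).modify exp PySem.Dict.empty (fun w => w.insert well PySem.Dict.empty))
        else d.insert exp w)
      = d.insert exp (if PySem.Str.isIn r.1 well then
          (poss.foldl (fun w q => if matchA r.2 q.1 then w.modify well PySem.Dict.empty (fun p => p.insert q.1 q.2) else w) (w.insert well PySem.Dict.empty))
        else w) := by
    intro d w r
    by_cases hr : PySem.Str.isIn r.1 well = true
    · rw [if_pos hr, if_pos hr, pvM1, chPoss]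
    · rw [if_neg hr, if_neg hr]
  rw [pvTransport exp sw _
      (fun w r => if PySem.Str.isIn r.1 well then
          (poss.foldl (fun w q => if matchA r.2 q.1 then w.modify well PySem.Dict.empty (fun p => p.insert q.1 q.2) else w) (w.insert well PySem.Dict.empty))
        else w)
      (fun d w x _ => step d w x) d w]
  congr 1
  have hin : ∀ (w : WD) (r : String × List String), r ∈ sw →
      (fun (w : WD) r => if PySem.Str.isIn r.1 well then
          (poss.foldl (fun w q => if matchA r.2 q.1 then w.modify well PySem.Dict.empty (fun p => p.insert q.1 q.2) else w) (w.insert well PySem.Dict.empty))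
        else w) w r
      = (fun (w : WD) (r : String × List String) =>
          if PySem.Str.isIn r.1 well then w.insert well (PDf r.2 poss) else w) w r := by
    intro w r _
    dsimp only
    by_cases hr : PySem.Str.isIn r.1 well = true
    · rw [if_pos hr, if_pos hr]
      rw [pvTransport well poss _
          (fun p q => if matchA r.2 q.1 then p.insert q.1 q.2 else p)
          (by
            intro d2 w2 x _
            dsimp only
            by_cases hx : matchA r.2 x.1 = true
            · rw [if_pos hx, if_pos hx, pvM1]
            · rw [if_neg hx, if_neg hx]) w PySem.Dict.empty]
      rw [chPDf r.2 poss hnd]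
    · rw [if_neg hr, if_neg hr]
  rw [PySem.List.foldl_congr_mem _ _ _ _ hin]
  exact pvResetLoop well (fun sl => PDf sl poss) sw w

theorem chWells (exp : String) (wells : List (String × List (String × Pv))) (sw : List (String × List String))
    (d : ED) (w : WD) (hnd : ∀ r ∈ wells, (r.2.map Prod.fst).Nodup) :
    aWellsA exp wells sw (d.insert exp w)
      = d.insert exp (wells.foldl (fun w r => (lastMatchB sw r.1).elim w (fun sl => w.insert r.1 (PDf sl r.2))) w) := by
  unfold aWellsA
  exact pvTransport exp wells (fun sd (q : String × List (String × Pv)) => aWellA exp q.1 q.2 sw sd)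
    (fun w r => (lastMatchB sw r.1).elim w (fun sl => w.insert r.1 (PDf sl r.2)))
    (by intro d w x hx; dsimp only; exact chWell exp x.1 x.2 sw d w (hnd x hx)) d w

theorem chWDf (sw : List (String × List String)) (wells : List (String × List (String × Pv)))
    (hwk : (wells.map Prod.fst).Nodup) :
    wells.foldl (fun w r => (lastMatchB sw r.1).elim w (fun sl => w.insert r.1 (PDf sl r.2))) PySem.Dict.empty = WDf sw wells := by
  have hcongr : ∀ (w : WD), ∀ r ∈ wells,
      (fun (w : WD) (r : String × List (String × Pv)) =>
        (lastMatchB sw r.1).elim w (fun sl => w.insert r.1 (PDf sl r.2))) w r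
      = (fun (w : WD) (r : String × List (String × Pv)) =>
        ((lastMatchB sw r.1).map (fun sl => PDf sl r.2)).elim w (fun v => w.insert r.1 v)) w r := by
    intro w r _
    dsimp only
    cases lastMatchB sw r.1 <;> rfl
  rw [PySem.List.foldl_congr_mem _ _ _ _ hcongr]
  rw [pvFreshFold (fun k x => (lastMatchB sw k).map (fun sl => PDf sl x)) wells PySem.Dict.empty hwk
      (fun p _ => PySem.Dict.contains_empty p.1)]
  unfold WDf
  refine congrArg PySem.Dict.mk ?_
  rw [show (PySem.Dict.empty : WD).items = [] from rfl, List.nil_append]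
  exact List.filterMap_congr (fun r _ => by cases lastMatchB sw r.1 <;> rfl)

theorem chExp (exp : String) (wells : List (String × List (String × Pv)))
    (sp : List (String × List (String × List String))) (sd : ED)
    (hwk : (wells.map Prod.fst).Nodup) (hnd : ∀ r ∈ wells, (r.2.map Prod.fst).Nodup) :
    aExpA exp wells sp sd = (lastMatchB sp exp).elim sd (fun sw => sd.insert exp (WDf sw wells)) := by
  unfold aExpA
  have hbody : ∀ (sd : ED), ∀ r ∈ sp,
      (fun (sd : ED) (r : String × List (String × List String)) =>
        if PySem.Str.isIn r.1 exp then aWellsA exp wells r.2 (sd.insert exp PySem.Dict.empty) else sd) sd r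
      = (fun (sd : ED) (r : String × List (String × List String)) =>
        if PySem.Str.isIn r.1 exp then sd.insert exp (WDf r.2 wells) else sd) sd r := by
    intro sd r _
    dsimp only
    by_cases hr : PySem.Str.isIn r.1 exp = true
    · rw [if_pos hr, if_pos hr, chWells exp wells r.2 sd PySem.Dict.empty hnd, chWDf r.2 wells hwk]
    · rw [if_neg hr, if_neg hr]
  rw [PySem.List.foldl_congr_mem _ _ _ _ hbody]
  exact pvResetLoop exp (fun sw => WDf sw wells) sp sd

theorem chSelA (ad : List (String × List (String × List (String × Pv))))
    (sp : List (String × List (String × List String)))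
    (hk : (ad.map Prod.fst).Nodup)
    (h2 : ∀ q ∈ ad, (q.2.map Prod.fst).Nodup ∧ ∀ r ∈ q.2, (r.2.map Prod.fst).Nodup) :
    ad.foldl (fun sd q => aExpA q.1 q.2 sp sd) PySem.Dict.empty = PySem.Dict.mk (SJ ad sp) := by
  have hbody : ∀ (sd : ED), ∀ q ∈ ad,
      (fun (sd : ED) (q : String × List (String × List (String × Pv))) => aExpA q.1 q.2 sp sd) sd q
      = (fun (sd : ED) (q : String × List (String × List (String × Pv))) =>
        ((lastMatchB sp q.1).map (fun sw => WDf sw q.2)).elim sd (fun v => sd.insert q.1 v)) sd q := by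
    intro sd q hq
    dsimp only
    rw [chExp q.1 q.2 sp sd (h2 q hq).1 (h2 q hq).2]
    cases lastMatchB sp q.1 <;> rfl
  rw [PySem.List.foldl_congr_mem _ _ _ _ hbody]
  rw [pvFreshFold (fun k x => (lastMatchB sp k).map (fun sw => WDf sw x)) ad PySem.Dict.empty hk
      (fun p _ => PySem.Dict.contains_empty p.1)]
  unfold SJ
  refine congrArg PySem.Dict.mk ?_
  rw [show (PySem.Dict.empty : ED).items = [] from rfl, List.nil_append]
  exact List.filterMap_congr (fun q _ => by cases lastMatchB sp q.1 <;> rfl)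

-- characterization of remove_empty_stuff -----------------------------------------------------

def pg1 (q : String × WD) : String × WD :=
  (q.1, PySem.Dict.mk (q.2.items.map (fun r =>
    (r.1, (PySem.Dict.mk (r.2.items.filter (fun s => !(((PySem.Dict.mk s.2).getD "cells" []).length == 0))) : PD)))))

def pg2 (q : String × WD) : String × WD :=
  (q.1, PySem.Dict.mk (q.2.items.filter (fun r => !(r.2.size == 0))))

def editI1 (q : String × WD) (w : WD) : WD :=
  q.2.items.foldl (fun w r => r.2.items.foldl (fun w s =>
    if ((PySem.Dict.mk s.2).getD "cells" []).length == 0 then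
      w.modify r.1 PySem.Dict.empty (fun p => p.erase s.1)
    else w) w) w

def editI2 (q : String × WD) (w : WD) : WD :=
  q.2.items.foldl (fun w r => if r.2.size == 0 then w.erase r.1 else w) w

theorem chEditI1 (q : String × WD) (hwq : (q.2.items.map Prod.fst).Nodup)
    (hpq : ∀ r ∈ q.2.items, (r.2.items.map Prod.fst).Nodup) :
    editI1 q q.2 = (pg1 q).2 := by
  have hstep : ∀ (d : WD) (p0 : PD) (r : String × PD),
      (fun (w : WD) (r : String × PD) => r.2.items.foldl (fun w s =>
        if ((PySem.Dict.mk s.2).getD "cells" []).length == 0 then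
          w.modify r.1 PySem.Dict.empty (fun p => p.erase s.1)
        else w) w) (d.insert r.1 p0) r
      = d.insert r.1 (r.2.items.foldl (fun p s =>
          if ((PySem.Dict.mk s.2).getD "cells" []).length == 0 then p.erase s.1 else p) p0) := by
    intro d p0 r
    dsimp only
    refine pvTransport r.1 r.2.items _
      (fun p s => if ((PySem.Dict.mk s.2).getD "cells" []).length == 0 then p.erase s.1 else p) ?_ d p0
    intro d2 w2 x _
    dsimp only
    by_cases hx : (((PySem.Dict.mk x.2).getD "cells" []).length == 0) = true
    · rw [if_pos hx, if_pos hx, pvM1]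
    · rw [if_neg hx, if_neg hx]
  have h0 : q.2.items.foldl (fun (w : WD) (r : String × PD) => r.2.items.foldl (fun w s =>
        if ((PySem.Dict.mk s.2).getD "cells" []).length == 0 then
          w.modify r.1 PySem.Dict.empty (fun p => p.erase s.1)
        else w) w) q.2
      = PySem.Dict.mk (q.2.items.map (fun r => (r.1, r.2.items.foldl (fun p s =>
          if ((PySem.Dict.mk s.2).getD "cells" []).length == 0 then p.erase s.1 else p) r.2))) := by
    have h00 := pvEditSelf
      (fun (w : WD) (r : String × PD) => r.2.items.foldl (fun w s =>
        if ((PySem.Dict.mk s.2).getD "cells" []).length == 0 then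
          w.modify r.1 PySem.Dict.empty (fun p => p.erase s.1)
        else w) w)
      (fun (r : String × PD) (p : PD) => r.2.items.foldl (fun p s =>
        if ((PySem.Dict.mk s.2).getD "cells" []).length == 0 then p.erase s.1 else p) p)
      hstep q.2.items [] (by simpa using hwq)
    simpa using h00
  unfold editI1
  rw [h0]
  refine congrArg PySem.Dict.mk (List.map_congr_left ?_)
  intro r hr
  have he : r.2.items.foldl (fun p s =>
        if ((PySem.Dict.mk s.2).getD "cells" []).length == 0 then p.erase s.1 else p) r.2
      = PySem.Dict.mk (r.2.items.filter (fun s => !(((PySem.Dict.mk s.2).getD "cells" []).length == 0))) := by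
    have h00 := pvEraseSelf (fun (s : String × Pv) => ((PySem.Dict.mk s.2).getD "cells" []).length == 0) r.2.items []
      (by simpa using hpq r hr)
    simpa using h00
  rw [he]

theorem chEditI2 (q : String × WD) (hwq : (q.2.items.map Prod.fst).Nodup) :
    editI2 q q.2 = (pg2 q).2 := by
  unfold editI2
  have h00 := pvEraseSelf (fun (r : String × PD) => r.2.size == 0) q.2.items [] (by simpa using hwq)
  simpa using h00

theorem chRem (L : List (String × WD)) (hk : (L.map Prod.fst).Nodup)
    (hw : ∀ q ∈ L, (q.2.items.map Prod.fst).Nodup)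
    (hp : ∀ q ∈ L, ∀ r ∈ q.2.items, (r.2.items.map Prod.fst).Nodup) :
    remove_empty_stuff (PySem.Dict.mk L)
      = PySem.Dict.mk (((L.map pg1).map pg2).filter (fun q => !(q.2.size == 0))) := by
  have hkeys1 : (L.map pg1).map Prod.fst = L.map Prod.fst := by
    rw [List.map_map]; exact List.map_congr_left (fun q _ => rfl)
  have hkeys2 : ((L.map pg1).map pg2).map Prod.fst = (L.map pg1).map Prod.fst := by
    rw [List.map_map]; exact List.map_congr_left (fun q _ => rfl)
  have h1 : ∀ (d : ED) (w : WD) (q : String × WD),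
      (fun (t : ED) (q : String × WD) => q.2.items.foldl (fun t r => r.2.items.foldl (fun t s =>
          if ((PySem.Dict.mk s.2).getD "cells" []).length == 0 then
            t.modify q.1 PySem.Dict.empty (fun w => w.modify r.1 PySem.Dict.empty (fun p => p.erase s.1))
          else t) t) t) (d.insert q.1 w) q
      = d.insert q.1 (editI1 q w) := by
    intro d w q
    dsimp only
    unfold editI1
    refine pvTransport q.1 q.2.items _
      (fun w r => r.2.items.foldl (fun w s =>
        if ((PySem.Dict.mk s.2).getD "cells" []).length == 0 then
          w.modify r.1 PySem.Dict.empty (fun p => p.erase s.1)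
        else w) w) ?_ d w
    intro d2 w2 r _
    dsimp only
    refine pvTransport q.1 r.2.items _
      (fun w s => if ((PySem.Dict.mk s.2).getD "cells" []).length == 0 then
        w.modify r.1 PySem.Dict.empty (fun p => p.erase s.1) else w) ?_ d2 w2
    intro d3 w3 x _
    dsimp only
    by_cases hx : (((PySem.Dict.mk x.2).getD "cells" []).length == 0) = true
    · rw [if_pos hx, if_pos hx, pvM1]
    · rw [if_neg hx, if_neg hx]
  have e1 : L.foldl (fun t (q : String × WD) => q.2.items.foldl (fun t r => r.2.items.foldl (fun t s =>
          if ((PySem.Dict.mk s.2).getD "cells" []).length == 0 then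
            t.modify q.1 PySem.Dict.empty (fun w => w.modify r.1 PySem.Dict.empty (fun p => p.erase s.1))
          else t) t) t) (PySem.Dict.mk L)
      = PySem.Dict.mk (L.map pg1) := by
    have h0 := pvEditSelf
      (fun (t : ED) (q : String × WD) => q.2.items.foldl (fun t r => r.2.items.foldl (fun t s =>
          if ((PySem.Dict.mk s.2).getD "cells" []).length == 0 then
            t.modify q.1 PySem.Dict.empty (fun w => w.modify r.1 PySem.Dict.empty (fun p => p.erase s.1))
          else t) t) t)
      editI1 h1 L [] (by simpa using hk)
    simp only [List.nil_append] at h0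
    have hmap : L.map (fun q => (q.1, editI1 q q.2)) = L.map pg1 :=
      List.map_congr_left (fun q hq => by rw [chEditI1 q (hw q hq) (hp q hq)]; rfl)
    rw [hmap] at h0
    exact h0
  have h2 : ∀ (d : ED) (w : WD) (q : String × WD),
      (fun (t : ED) (q : String × WD) => q.2.items.foldl (fun t r =>
          if r.2.size == 0 then t.modify q.1 PySem.Dict.empty (fun w => w.erase r.1) else t) t) (d.insert q.1 w) q
      = d.insert q.1 (editI2 q w) := by
    intro d w q
    dsimp only
    unfold editI2
    refine pvTransport q.1 q.2.items _
      (fun w r => if r.2.size == 0 then w.erase r.1 else w) ?_ d w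
    intro d2 w2 r _
    dsimp only
    by_cases hr : (r.2.size == 0) = true
    · rw [if_pos hr, if_pos hr, pvM1]
    · rw [if_neg hr, if_neg hr]
  have e2 : (L.map pg1).foldl (fun t (q : String × WD) => q.2.items.foldl (fun t r =>
          if r.2.size == 0 then t.modify q.1 PySem.Dict.empty (fun w => w.erase r.1) else t) t) (PySem.Dict.mk (L.map pg1))
      = PySem.Dict.mk ((L.map pg1).map pg2) := by
    have h0 := pvEditSelf
      (fun (t : ED) (q : String × WD) => q.2.items.foldl (fun t r =>
          if r.2.size == 0 then t.modify q.1 PySem.Dict.empty (fun w => w.erase r.1) else t) t)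
      editI2 h2 (L.map pg1) [] (by rw [List.nil_append, hkeys1]; exact hk)
    simp only [List.nil_append] at h0
    have hmap : (L.map pg1).map (fun q => (q.1, editI2 q q.2)) = (L.map pg1).map pg2 := by
      refine List.map_congr_left ?_
      intro q hq
      obtain ⟨q0, hq0, rfl⟩ := List.mem_map.mp hq
      rw [chEditI2 (pg1 q0) (by simpa [pg1, List.map_map] using hw q0 hq0)]
      rfl
    rw [hmap] at h0
    exact h0
  have e3 : ((L.map pg1).map pg2).foldl (fun t (q : String × WD) =>
        if q.2.size == 0 then t.erase q.1 else t) (PySem.Dict.mk ((L.map pg1).map pg2))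
      = PySem.Dict.mk (((L.map pg1).map pg2).filter (fun q => !(q.2.size == 0))) := by
    have h0 := pvEraseSelf (fun (q : String × WD) => q.2.size == 0) ((L.map pg1).map pg2) []
      (by rw [List.nil_append, hkeys2, hkeys1]; exact hk)
    simpa using h0
  unfold remove_empty_stuff
  dsimp only
  rw [e1]
  dsimp only
  rw [e2]
  dsimp only
  rw [e3]

-- B in filterMap form and the final list identity --------------------------------------------

def fBW (sw : List (String × List String)) (r : String × List (String × Pv)) : Option (String × List (String × Pv)) :=
  match lastMatchB sw r.1 with
  | none => none
  | some sl =>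
    let wo := r.2.filter (fun s => matchA sl s.1 && !(((PySem.Dict.mk s.2).getD "cells" []).length == 0))
    if wo.isEmpty then none else some (r.1, wo)

theorem chBW (sw : List (String × List String)) :
    ∀ (wells : List (String × List (String × Pv))) (acc : List (String × List (String × Pv))),
      wells.foldl (fun eo r =>
        match lastMatchB sw r.1 with
        | none => eo
        | some selposs =>
          let wellOut := r.2.filter (fun s =>
            selposs.any (fun t => PySem.Str.isIn t s.1) &&
              !(((PySem.Dict.mk s.2).getD "cells" []).length == 0))
          if wellOut.isEmpty then eo else eo ++ [(r.1, wellOut)]) acc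
      = acc ++ wells.filterMap (fBW sw) := by
  intro wells
  induction wells with
  | nil => intro acc; simp
  | cons r t ih =>
    intro acc
    simp only [List.foldl_cons, List.filterMap_cons]
    cases hm : lastMatchB sw r.1 with
    | none =>
      have hf : fBW sw r = none := by unfold fBW; rw [hm]
      rw [hf]
      exact ih acc
    | some sl =>
      have hf : fBW sw r = (if (r.2.filter (fun s =>
            sl.any (fun t => PySem.Str.isIn t s.1) &&
              !(((PySem.Dict.mk s.2).getD "cells" []).length == 0))).isEmpty
          then none
          else some (r.1, r.2.filter (fun s =>
            sl.any (fun t => PySem.Str.isIn t s.1) &&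
              !(((PySem.Dict.mk s.2).getD "cells" []).length == 0)))) := by
        unfold fBW
        rw [hm]
        rfl
      rw [hf]
      simp only []
      by_cases hE : (r.2.filter (fun s =>
          sl.any (fun t => PySem.Str.isIn t s.1) &&
            !(((PySem.Dict.mk s.2).getD "cells" []).length == 0))).isEmpty = true
      · rw [if_pos hE, if_pos hE]
        exact ih acc
      · rw [if_neg hE, if_neg hE]
        rw [ih (acc ++ [(r.1, r.2.filter (fun s =>
            sl.any (fun t => PySem.Str.isIn t s.1) &&
              !(((PySem.Dict.mk s.2).getD "cells" []).length == 0)))])]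
        simp

theorem chB (ad : List (String × List (String × List (String × Pv))))
    (sp : List (String × List (String × List String))) :
    select_data_alt ad sp = ad.filterMap (fun q =>
      match lastMatchB sp q.1 with
      | none => none
      | some sw =>
        let eo := q.2.filterMap (fBW sw)
        if eo.isEmpty then none else some (q.1, eo)) := by
  suffices h : ∀ (ad : List (String × List (String × List (String × Pv)))) (acc : List (String × List (String × List (String × Pv)))),
      ad.foldl (fun result q =>
        match lastMatchB sp q.1 with
        | none => result
        | some selwells =>
          let expOut := q.2.foldl (fun eo r =>
            match lastMatchB selwells r.1 with
            | none => eo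
            | some selposs =>
              let wellOut := r.2.filter (fun s =>
                selposs.any (fun t => PySem.Str.isIn t s.1) &&
                  !(((PySem.Dict.mk s.2).getD "cells" []).length == 0))
              if wellOut.isEmpty then eo else eo ++ [(r.1, wellOut)]) []
          if expOut.isEmpty then result else result ++ [(q.1, expOut)]) acc
      = acc ++ ad.filterMap (fun q =>
          match lastMatchB sp q.1 with
          | none => none
          | some sw =>
            let eo := q.2.filterMap (fBW sw)
            if eo.isEmpty then none else some (q.1, eo)) by
    have h2 := h ad []
    rw [List.nil_append] at h2
    exact h2
  intro ad2
  induction ad2 with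
  | nil => intro acc; simp
  | cons q t ih =>
    intro acc
    simp only [List.foldl_cons, List.filterMap_cons]
    cases hm : lastMatchB sp q.1 with
    | none => exact ih acc
    | some sw =>
      simp only []
      rw [chBW sw q.2 [], List.nil_append]
      by_cases hE : (q.2.filterMap (fBW sw)).isEmpty = true
      · rw [if_pos hE, if_pos hE]
        exact ih acc
      · rw [if_neg hE, if_neg hE]
        rw [ih (acc ++ [(q.1, q.2.filterMap (fBW sw))])]
        simp

theorem wellLevel (sw : List (String × List String)) (wells : List (String × List (String × Pv))) :
    (((WDf sw wells).items.map (fun r =>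
        (r.1, (PySem.Dict.mk (r.2.items.filter (fun s => !(((PySem.Dict.mk s.2).getD "cells" []).length == 0))) : PD)))).filter
      (fun r => !(r.2.size == 0))).map (fun r => (r.1, r.2.items))
      = wells.filterMap (fBW sw) := by
  induction wells with
  | nil => rfl
  | cons r t ih =>
    simp only [WDf, List.filterMap_cons] at ih ⊢
    cases hm : lastMatchB sw r.1 with
    | none =>
      have hf : fBW sw r = none := by unfold fBW; rw [hm]
      rw [hf]
      exact ih
    | some sl =>
      have hf : fBW sw r = (if (r.2.filter (fun s =>
            sl.any (fun t => PySem.Str.isIn t s.1) &&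
              !(((PySem.Dict.mk s.2).getD "cells" []).length == 0))).isEmpty
          then none
          else some (r.1, r.2.filter (fun s =>
            sl.any (fun t => PySem.Str.isIn t s.1) &&
              !(((PySem.Dict.mk s.2).getD "cells" []).length == 0)))) := by
        unfold fBW
        rw [hm]
        rfl
      rw [hf]
      simp only [Option.map_some, List.map_cons, PDf]
      rw [List.filter_filter]
      have hpred : (r.2.filter (fun s =>
            (!(((PySem.Dict.mk s.2).getD "cells" []).length == 0)) && matchA sl s.1))
          = r.2.filter (fun s =>
            sl.any (fun t => PySem.Str.isIn t s.1) &&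
              !(((PySem.Dict.mk s.2).getD "cells" []).length == 0)) :=
        List.filter_congr (fun s _ => by rw [Bool.and_comm]; rfl)
      rw [hpred]
      by_cases h0 : r.2.filter (fun s =>
          sl.any (fun t => PySem.Str.isIn t s.1) &&
            !(((PySem.Dict.mk s.2).getD "cells" []).length == 0)) = []
      · rw [List.filter_cons_of_neg (by rw [h0]; simp [PySem.Dict.size]),
          if_pos (List.isEmpty_iff.mpr h0)]
        exact ih
      · rw [List.filter_cons_of_pos (by
            simp only [PySem.Dict.size]
            simpa using h0),
          if_neg (by simpa [List.isEmpty_iff] using h0), List.map_cons]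
        exact congrArg₂ List.cons rfl ih

theorem finalEq (ad : List (String × List (String × List (String × Pv))))
    (sp : List (String × List (String × List String))) :
    ((((SJ ad sp).map pg1).map pg2).filter (fun q => !(q.2.size == 0))).map
        (fun q => (q.1, q.2.items.map (fun r => (r.1, r.2.items))))
      = select_data_alt ad sp := by
  rw [chB]
  unfold SJ
  induction ad with
  | nil => rfl
  | cons q t ih =>
    simp only [List.filterMap_cons]
    cases hm : lastMatchB sp q.1 with
    | none => exact ih
    | some sw =>
      simp only [Option.map_some, List.map_cons]
      have hhd : pg2 (pg1 (q.1, WDf sw q.2))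
          = (q.1, PySem.Dict.mk ((((WDf sw q.2).items.map (fun r =>
              (r.1, (PySem.Dict.mk (r.2.items.filter (fun s => !(((PySem.Dict.mk s.2).getD "cells" []).length == 0))) : PD)))).filter
            (fun r => !(r.2.size == 0))))) := by
        unfold pg1 pg2
        rfl
      rw [hhd]
      by_cases h0 : (((WDf sw q.2).items.map (fun r =>
            (r.1, (PySem.Dict.mk (r.2.items.filter (fun s => !(((PySem.Dict.mk s.2).getD "cells" []).length == 0))) : PD)))).filter
          (fun r => !(r.2.size == 0))) = []
      · have hempty : q.2.filterMap (fBW sw) = [] := by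
          rw [← wellLevel sw q.2, h0]
          rfl
        rw [List.filter_cons_of_neg (by rw [h0]; simp [PySem.Dict.size])]
        rw [hempty]
        exact ih
      · have hne : ¬ q.2.filterMap (fBW sw) = [] := by
          rw [← wellLevel sw q.2]
          intro hx
          exact h0 (List.map_eq_nil_iff.mp hx)
        have hlen : (((WDf sw q.2).items.map (fun r =>
            (r.1, (PySem.Dict.mk (r.2.items.filter (fun s => !(((PySem.Dict.mk s.2).getD "cells" []).length == 0))) : PD)))).filter
          (fun r => !(r.2.size == 0))).length ≠ 0 :=
          fun h => h0 (List.length_eq_zero_iff.mp h)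
        rw [List.filter_cons_of_pos (by
            show (!((((WDf sw q.2).items.map (fun r =>
                (r.1, (PySem.Dict.mk (r.2.items.filter (fun s => !(((PySem.Dict.mk s.2).getD "cells" []).length == 0))) : PD)))).filter
              (fun r => !(r.2.size == 0))).length == 0)) = true
            rw [beq_eq_false_iff_ne.mpr hlen, Bool.not_false]), List.map_cons]
        rw [if_neg (by simpa [List.isEmpty_iff] using hne)]
        refine congrArg₂ List.cons ?_ ih
        rw [← wellLevel sw q.2]

-- ===== VERDICT (by name: the statement is the Claim_ definition above) =====
set_option maxHeartbeats 2000000 in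
theorem select_data_spec : Claim_equal_select_data := by
  intro ad sp _ hpre
  unfold Spec_select_data
  obtain ⟨⟨hk, h2⟩, -⟩ := hpre
  have hmemSJ : ∀ q ∈ SJ ad sp, ∃ a ∈ ad, ∃ sw, lastMatchB sp a.1 = some sw ∧ q = (a.1, WDf sw a.2) := by
    intro q hq
    unfold SJ at hq
    obtain ⟨a, ha, hEq⟩ := List.mem_filterMap.mp hq
    cases hsw : lastMatchB sp a.1 with
    | none => rw [hsw] at hEq; simp at hEq
    | some sw =>
      rw [hsw] at hEq
      simp only [Option.map_some, Option.some.injEq] at hEq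
      exact ⟨a, ha, sw, hsw, hEq.symm⟩
  have hknd : ((SJ ad sp).map Prod.fst).Nodup := by
    have hSJeq : SJ ad sp = ad.filterMap (fun q =>
        ((lastMatchB sp q.1).map (fun sw => WDf sw q.2)).map (fun v => (q.1, v))) := by
      unfold SJ
      exact List.filterMap_congr (fun q _ => by cases lastMatchB sp q.1 <;> rfl)
    rw [hSJeq]
    exact (pvKeysFilterMap ad _).nodup hk
  have hwnd : ∀ q ∈ SJ ad sp, (q.2.items.map Prod.fst).Nodup := by
    intro q hq
    obtain ⟨a, ha, sw, hsw, rfl⟩ := hmemSJ q hq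
    show ((WDf sw a.2).items.map Prod.fst).Nodup
    have hWeq : (WDf sw a.2).items = a.2.filterMap (fun r =>
        ((lastMatchB sw r.1).map (fun sl => PDf sl r.2)).map (fun v => (r.1, v))) := by
      show (a.2.filterMap (fun r => (lastMatchB sw r.1).map (fun sl => (r.1, PDf sl r.2)))) = _
      exact List.filterMap_congr (fun r _ => by cases lastMatchB sw r.1 <;> rfl)
    rw [hWeq]
    exact (pvKeysFilterMap a.2 _).nodup (h2 a ha).1
  have hpnd : ∀ q ∈ SJ ad sp, ∀ r ∈ q.2.items, (r.2.items.map Prod.fst).Nodup := by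
    intro q hq r hr
    obtain ⟨a, ha, sw, hsw, rfl⟩ := hmemSJ q hq
    have hr' : r ∈ a.2.filterMap (fun r => (lastMatchB sw r.1).map (fun sl => (r.1, PDf sl r.2))) := hr
    obtain ⟨b, hb, hEq⟩ := List.mem_filterMap.mp hr'
    cases hsl : lastMatchB sw b.1 with
    | none => rw [hsl] at hEq; simp at hEq
    | some sl =>
      rw [hsl] at hEq
      simp only [Option.map_some, Option.some.injEq] at hEq
      rw [← hEq]
      show (((b.2.filter (fun s => matchA sl s.1))).map Prod.fst).Nodup
      exact (List.Sublist.map Prod.fst List.filter_sublist).nodup ((h2 a ha).2 b hb)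
  unfold select_data
  rw [chSelA ad sp hk h2, chRem (SJ ad sp) hknd hwnd hpnd]
  exact finalEq ad sp
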